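-- pv_equiv track=rewrite | github.com/manas-17045/LeetcodeSolutions | Leetcode 2001-2100/2012/2012_2.py | sumBeauties
-- ===== SOURCE A (Python) =====
-- def sumBeauties(nums: list[int]) -> int:
--     """
--     Calculates the sum of "beauties" for elements in a given list `nums`.
--
--     An element `nums[i]` (where 1 < i < n - 1) is considered:
--     - "beautiful" with a score of 2 if `nums[j] < nums[i] < nums[k]` for all `j < i` and all `k > i`.
--     - "beautiful" with a score of 1 if `nums[i-1] < nums[i] < nums[i+1]`.
--
--     The function returns the total sum of these beauty scores.
--     """
--     n = len(nums)
--     # Build suffix_min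
--     suffix_min = [0] * n
--     INF = 10**9 + 5
--     suffix_min[n - 1] = INF
--     for i in range((n - 2), -1, -1):
--         # The smallest element to the right of i is either
--         # nums[i + 1] or the smallest to the right of (i + 1).
--         suffix_min[i] = min(suffix_min[i + 1], nums[i + 1])
--
--     beauty_sum = 0
--     left_max = nums[0]  # Max of nums[0...(i - 1)] at each i
--
--     # Iterate only over i = 1...(n - 2)
--     for i in range(1, (n - 1)):
--         x = nums[i]
--         if left_max < x < suffix_min[i]:
--             beauty_sum += 2
--         elif nums[i - 1] < x < nums[i + 1]:
--             beauty_sum += 1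
--
--         # Update prefix max for next iteration
--         left_max = max(left_max, x)
--
--     return beauty_sum
-- ===== SOURCE B (Python) =====
-- def sumBeauties(nums: list[int]) -> int:
--     n = len(nums)
--     # a globally beautiful element is also locally beautiful, so the
--     # total score is the count of local valleys plus the count of global ones;
--     # the global condition is checked directly from the definition per index
--     local = sum(1 for i in range(1, n - 1) if nums[i - 1] < nums[i] < nums[i + 1])
--     glob = sum(1 for i in range(1, n - 1) if max(nums[:i]) < nums[i] < min(nums[i + 1:]))
--     return local + glob
-- ===== Notes on version B (the rewrite author's own statement) =====
-- stated objective: alternative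
-- what changed: Replaces A's linear-pass machinery (INF-capped suffix_min array plus a running left_max inside one interleaved if/elif loop) by a direct per-index brute-force check: total = count of local valleys + count of indices beating max(nums[:i]) and min(nums[i+1:]) computed from the slices themselves, using the identity that a globally beautiful element is also locally beautiful.
-- intended difference: On inputs with some position i (1 <= i <= n-2) where nums[i] >= 10**9+5, every earlier element is smaller and every later element is larger, A's INF=10**9+5 sentinel caps the suffix minimum so A scores that element 1 instead of 2; B computes the true suffix minimum and scores it 2, which is what the docstring's definition of beauty requires. — e.g. on sumBeauties([0, 1000000005, 1000000006]): A returns 1, B returns 2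
import Mathlib
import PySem

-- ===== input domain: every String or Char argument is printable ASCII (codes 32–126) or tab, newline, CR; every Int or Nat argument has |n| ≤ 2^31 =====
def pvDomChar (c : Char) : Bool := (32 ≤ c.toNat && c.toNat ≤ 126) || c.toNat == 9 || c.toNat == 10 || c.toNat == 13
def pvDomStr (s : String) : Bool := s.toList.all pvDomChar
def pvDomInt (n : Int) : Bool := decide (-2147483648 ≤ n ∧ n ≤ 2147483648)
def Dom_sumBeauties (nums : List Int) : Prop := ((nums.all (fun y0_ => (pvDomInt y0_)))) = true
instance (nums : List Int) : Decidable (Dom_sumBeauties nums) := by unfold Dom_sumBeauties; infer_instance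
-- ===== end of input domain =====

-- B replaces A's interleaved if/elif loop (running left_max, INF-capped suffix_min array) by a
-- per-index brute-force check on the slices themselves: total = #local valleys + #global peaks;
-- on the D_ inputs below A's 10^9+5 sentinel makes it score 1 where 2 is intended and B returns 2.


-- ===== PORT A =====
-- suffix_min[i] = min(suffix_min[i + 1], nums[i + 1]) (backward loop body)
def aSufStep (nums : List Int) (sm : List Int) (i : Int) : List Int :=
  PySem.List.pySetD sm i (min (PySem.List.pyGetD sm (i + 1) 0) (PySem.List.pyGetD nums (i + 1) 0))

-- body of the main loop: state = (beauty_sum, left_max)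
def aBody (nums sm : List Int) (st : Int × Int) (i : Int) : Int × Int :=
  let x := PySem.List.pyGetD nums i 0
  let bs :=
    if st.2 < x ∧ x < PySem.List.pyGetD sm i 0 then st.1 + 2
    else if PySem.List.pyGetD nums (i - 1) 0 < x ∧ x < PySem.List.pyGetD nums (i + 1) 0 then st.1 + 1
    else st.1
  (bs, max st.2 x)

def sumBeauties (nums : List Int) : Int :=
  let n : Int := (nums.length : Int)
  let INF : Int := 10 ^ 9 + 5
  let sm0 : List Int := PySem.List.pySetD (List.replicate nums.length 0) (n - 1) INF
  let sm := (PySem.List.pyRange (n - 2) (-1) (-1)).foldl (aSufStep nums) sm0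
  ((PySem.List.pyRange 1 (n - 1) 1).foldl (aBody nums sm) (0, PySem.List.pyGetD nums 0 0)).1

-- ===== PORT B =====
-- B is a per-index brute-force: local valleys from the neighbours, global peaks from
-- max(nums[:i]) / min(nums[i+1:]) computed on the slices; totals added.
-- max/min of a nonempty Python list ↦ PySem.List.max?/min? (identity key), .getD 0 never
-- fires on the loop's range (slices nonempty there), where the Python never raises.
def sumBeauties_alt (nums : List Int) : Int :=
  let n : Int := (nums.length : Int)
  let lcl := ((PySem.List.pyRange 1 (n - 1) 1).map (fun i =>
      if PySem.List.pyGetD nums (i - 1) 0 < PySem.List.pyGetD nums i 0 ∧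
         PySem.List.pyGetD nums i 0 < PySem.List.pyGetD nums (i + 1) 0 then (1 : Int) else 0)).sum
  let glb := ((PySem.List.pyRange 1 (n - 1) 1).map (fun i =>
      if (PySem.List.max? (PySem.List.slice nums none (some i)) (fun y => y)).getD 0 <
           PySem.List.pyGetD nums i 0 ∧
         PySem.List.pyGetD nums i 0 <
           (PySem.List.min? (PySem.List.slice nums (some (i + 1)) none) (fun y => y)).getD 0
       then (1 : Int) else 0)).sum
  lcl + glb

-- ===== PRECONDITION & SPEC =====
-- Pre_ excludes only the empty list, on which A raises IndexError (suffix_min[-1] on []).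
def Pre_sumBeauties (nums : List Int) : Prop := nums ≠ []
instance (nums : List Int) : Decidable (Pre_sumBeauties nums) := by unfold Pre_sumBeauties; infer_instance
def pvWitness_sumBeauties : List Int := [1, 2, 3]

-- On inputs with a position i (1 ≤ i ≤ n-2) where nums[i] ≥ 10^9+5, every earlier element is smaller
-- and every later element is larger, A's INF = 10^9+5 sentinel caps the suffix minimum so A scores
-- that element 1; B computes the true suffix minimum and scores it 2, as the docstring intends.
def D_sumBeauties (nums : List Int) : Prop :=
  ∃ i < nums.length, 1 ≤ i ∧ i + 1 < nums.length ∧ 10 ^ 9 + 5 ≤ nums.getD i 0 ∧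
    (∀ j < i, nums.getD j 0 < nums.getD i 0) ∧
    (∀ k < nums.length, i < k → nums.getD i 0 < nums.getD k 0)
instance (nums : List Int) : Decidable (D_sumBeauties nums) := by unfold D_sumBeauties; infer_instance

def Spec_sumBeauties (nums : List Int) (out : Int) : Prop := ¬ D_sumBeauties nums → out = sumBeauties_alt nums
instance (nums : List Int) (out : Int) : Decidable (Spec_sumBeauties nums out) := by unfold Spec_sumBeauties; infer_instance

def pvDiffWitness_sumBeauties : List Int := [0, 1000000005, 1000000006]
def pvDiffWitnessOut_sumBeauties : Int × Int := (1, 2)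

-- ===== CLAIM (what is proved, stated in full; the proofs are below) =====
def Claim_unchanged_sumBeauties : Prop := ∀ (nums : List Int), Dom_sumBeauties nums → Pre_sumBeauties nums → Spec_sumBeauties nums (sumBeauties nums)
def Claim_changed_sumBeauties : Prop := Dom_sumBeauties (pvDiffWitness_sumBeauties) ∧ Pre_sumBeauties (pvDiffWitness_sumBeauties) ∧ D_sumBeauties (pvDiffWitness_sumBeauties) ∧ sumBeauties (pvDiffWitness_sumBeauties) = pvDiffWitnessOut_sumBeauties.1 ∧ sumBeauties_alt (pvDiffWitness_sumBeauties) = pvDiffWitnessOut_sumBeauties.2 ∧ pvDiffWitnessOut_sumBeauties.1 ≠ pvDiffWitnessOut_sumBeauties.2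
def Claim_exact_sumBeauties : Prop := ∀ (nums : List Int), Dom_sumBeauties nums → Pre_sumBeauties nums → D_sumBeauties nums → sumBeauties nums ≠ sumBeauties_alt nums

-- ===== LEMMAS AND PROOFS =====

-- proof-side abbreviations: element, prefix max (of nums[0..j-1]), suffix min (of nums[j+1..])
def pvX (nums : List Int) (j : Nat) : Int := nums.getD j 0
def pvPmax (nums : List Int) (j : Nat) : Int := (nums.take j).foldl max (pvX nums 0)
def pvSmin (nums : List Int) (j : Nat) : Int := (nums.drop (j + 1)).foldl min (pvX nums (nums.length - 1))
-- the value A's suffix_min array holds at j (INF at n-1, min INF (true suffix min) below)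
def pvCapA (nums : List Int) (j : Nat) : Int :=
  if nums.length ≤ j + 1 then 10 ^ 9 + 5 else min (10 ^ 9 + 5) (pvSmin nums j)

theorem pvPmax_one (nums : List Int) (h : nums ≠ []) : pvPmax nums 1 = pvX nums 0 := by
  match nums, h with
  | a :: t, _ => simp [pvPmax, pvX]

theorem pvPmax_succ (nums : List Int) (j : Nat) (h : j < nums.length) :
    pvPmax nums (j + 1) = max (pvPmax nums j) (pvX nums j) := by
  unfold pvPmax
  have ht : nums.take (j + 1) = nums.take j ++ [nums[j]] := by
    rw [List.take_add_one, List.getElem?_eq_getElem h]; rfl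
  rw [ht, List.foldl_append]
  simp [pvX, List.getD, List.getElem?_eq_getElem h]

theorem pvSmin_last (nums : List Int) (h : 2 ≤ nums.length) :
    pvSmin nums (nums.length - 2) = pvX nums (nums.length - 1) := by
  unfold pvSmin
  have h1 : nums.length - 2 + 1 = nums.length - 1 := by omega
  have h2 : nums.length - 1 < nums.length := by omega
  have hd : nums.drop (nums.length - 1) = [nums[nums.length - 1]] := by
    rw [List.drop_eq_getElem_cons h2]
    simp [List.drop_eq_nil_of_le (by omega : nums.length ≤ nums.length - 1 + 1)]
  rw [h1, hd]
  simp [pvX, List.getD, List.getElem?_eq_getElem h2]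

theorem pvSmin_succ (nums : List Int) (j : Nat) (h : j + 2 ≤ nums.length) :
    pvSmin nums j = min (pvX nums (j + 1)) (pvSmin nums (j + 1)) := by
  unfold pvSmin
  have h1 : j + 1 < nums.length := by omega
  rw [List.drop_eq_getElem_cons h1, List.foldl_cons, min_comm _ nums[j+1], List.foldl_assoc]
  have : j + 1 + 1 = j + 2 := rfl
  simp [pvX, List.getD, List.getElem?_eq_getElem h1]

theorem pvCapA_step (nums : List Int) (j : Nat) (h : j + 2 ≤ nums.length) :
    min (pvCapA nums (j + 1)) (pvX nums (j + 1)) = pvCapA nums j := by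
  unfold pvCapA
  by_cases hc : nums.length ≤ j + 2
  · have hn : nums.length = j + 2 := by omega
    have : pvSmin nums j = pvX nums (j + 1) := by
      have := pvSmin_last nums (by omega)
      have hj : nums.length - 2 = j := by omega
      have hj1 : nums.length - 1 = j + 1 := by omega
      rwa [hj, hj1] at this
    simp only [if_pos hc, if_neg (by omega : ¬ nums.length ≤ j + 1)]
    omega
  · simp only [if_neg hc, if_neg (by omega : ¬ nums.length ≤ j + 1)]
    rw [pvSmin_succ nums j h]
    omega


theorem getD_set_ne {xs : List Int} {n j : Nat} (v : Int) (h : j ≠ n) :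
    (xs.set n v).getD j 0 = xs.getD j 0 := by
  simp [List.getD, List.getElem?_set_ne (by omega : n ≠ j)]

theorem getD_set_self {xs : List Int} {n : Nat} (v : Int) (h : n < xs.length) :
    (xs.set n v).getD n 0 = v := by
  simp [List.getD, h]

-- A's backward suffix_min build: below t the array carries pvCapA, above t it is untouched
theorem aBuild (nums : List Int) : ∀ (t : Nat) (sm : List Int), sm.length = nums.length →
    t + 2 ≤ nums.length →
    (∀ j : Nat, t < j → j < nums.length → sm.getD j 0 = pvCapA nums j) →
    ∀ j : Nat, j < nums.length →
    ((PySem.List.pyRange (t : Int) (-1) (-1)).foldl (aSufStep nums) sm).getD j 0 =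
      if j ≤ t then pvCapA nums j else sm.getD j 0 := by
  intro t
  induction t with
  | zero =>
    intro sm hlen hn hinv j hj
    rw [PySem.List.pyRange_neg_one_cons (by omega), PySem.List.pyRange_neg_one_eq_nil (by omega)]
    simp only [List.foldl_cons, List.foldl_nil, aSufStep]
    have e1 : (((0 : Nat) : Int) + 1) = ((1 : Nat) : Int) := by norm_num
    rw [e1, PySem.List.pyGetD_natCast, PySem.List.pyGetD_natCast, PySem.List.pySetD_natCast]
    have hv : min (sm.getD 1 0) (nums.getD 1 0) = pvCapA nums 0 := by
      rw [hinv 1 (by omega) (by omega)]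
      exact pvCapA_step nums 0 hn
    rcases Nat.eq_zero_or_pos j with hj0 | hj0
    · subst hj0; rw [getD_set_self _ (by omega), if_pos (le_refl 0)]; exact hv
    · rw [getD_set_ne _ (by omega), if_neg (by omega)]
  | succ s ih =>
    intro sm hlen hn hinv j hj
    rw [PySem.List.pyRange_neg_one_cons (by omega)]
    simp only [List.foldl_cons, aSufStep]
    have e1 : ((((s + 1 : Nat)) : Int) + 1) = (((s + 2 : Nat)) : Int) := by push_cast; ring
    rw [e1, PySem.List.pyGetD_natCast, PySem.List.pyGetD_natCast, PySem.List.pySetD_natCast]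
    have hv : min (sm.getD (s + 2) 0) (nums.getD (s + 2) 0) = pvCapA nums (s + 1) := by
      rw [hinv (s + 2) (by omega) (by omega)]
      exact pvCapA_step nums (s + 1) hn
    have es2 : ((((s + 1 : Nat)) : Int) - 1) = ((s : Nat) : Int) := by push_cast; ring
    rw [es2, ih (sm.set (s + 1) (min (sm.getD (s + 2) 0) (nums.getD (s + 2) 0)))
      (by simpa using hlen) (by omega) ?_ j hj]
    · by_cases hjs : j ≤ s
      · rw [if_pos hjs, if_pos (by omega)]
      · rw [if_neg hjs]
        by_cases hje : j = s + 1
        · subst hje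
          rw [if_pos (le_refl _), getD_set_self _ (by omega)]
          exact hv
        · rw [if_neg (by omega), getD_set_ne _ (by omega)]
    · intro j' hj1 hj2
      by_cases hje : j' = s + 1
      · subst hje; rw [getD_set_self _ (by omega)]; exact hv
      · rw [getD_set_ne _ (by omega)]; exact hinv j' (by omega) hj2

-- per-index score of A's main loop (sm = A's suffix_min array)
def pvAScore (nums sm : List Int) (i : Int) : Int :=
  if pvPmax nums i.toNat < PySem.List.pyGetD nums i 0 ∧
     PySem.List.pyGetD nums i 0 < PySem.List.pyGetD sm i 0 then 2
  else if PySem.List.pyGetD nums (i - 1) 0 < PySem.List.pyGetD nums i 0 ∧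
          PySem.List.pyGetD nums i 0 < PySem.List.pyGetD nums (i + 1) 0 then 1
  else 0

-- B's two per-index counts, with the slice extrema replaced by their values
def pvLoc (nums : List Int) (i : Int) : Int :=
  if PySem.List.pyGetD nums (i - 1) 0 < PySem.List.pyGetD nums i 0 ∧
     PySem.List.pyGetD nums i 0 < PySem.List.pyGetD nums (i + 1) 0 then 1 else 0
def pvGlob (nums : List Int) (i : Int) : Int :=
  if pvPmax nums i.toNat < PySem.List.pyGetD nums i 0 ∧
     PySem.List.pyGetD nums i 0 < pvSmin nums i.toNat then 1 else 0

-- A's main loop accumulates the per-index scores, with left_max = pvPmax as invariant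
theorem aMain (nums sm : List Int) : ∀ (k a : Nat), 1 ≤ a → nums.length ≤ a + 1 + k → ∀ s : Int,
    ((PySem.List.pyRange (a : Int) ((nums.length : Int) - 1) 1).foldl (aBody nums sm) (s, pvPmax nums a)).1
      = s + ((PySem.List.pyRange (a : Int) ((nums.length : Int) - 1) 1).map (pvAScore nums sm)).sum := by
  intro k
  induction k with
  | zero =>
    intro a ha hk s
    rw [PySem.List.pyRange_one_eq_nil (by push_cast; omega)]
    simp
  | succ t ih =>
    intro a ha hk s
    by_cases han : nums.length ≤ a + 1
    · rw [PySem.List.pyRange_one_eq_nil (by push_cast; omega)]; simp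
    · rw [PySem.List.pyRange_one_cons (by push_cast; omega)]
      simp only [List.foldl_cons, List.map_cons, List.sum_cons]
      have hstep : aBody nums sm (s, pvPmax nums a) (a : Int)
          = (s + pvAScore nums sm (a : Int), pvPmax nums (a + 1)) := by
        simp only [aBody, pvAScore, Int.toNat_natCast, pvPmax_succ nums a (by omega)]
        rw [PySem.List.pyGetD_natCast]
        show _ = (_, max _ (pvX nums a))
        unfold pvX
        split_ifs <;> simp
      rw [hstep]
      have ea : ((a : Int) + 1) = (((a + 1 : Nat)) : Int) := by push_cast; ring
      rw [ea, ih (a + 1) (by omega) (by omega)]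
      ring

-- A = sum of per-index scores (n ≥ 2)
theorem A_eq (nums : List Int) (h2 : 2 ≤ nums.length) :
    sumBeauties nums =
      ((PySem.List.pyRange 1 ((nums.length : Int) - 1) 1).map
        (pvAScore nums ((PySem.List.pyRange ((nums.length : Int) - 2) (-1) (-1)).foldl (aSufStep nums)
          (PySem.List.pySetD (List.replicate nums.length 0) ((nums.length : Int) - 1) (10 ^ 9 + 5))))).sum := by
  show ((PySem.List.pyRange 1 ((nums.length : Int) - 1) 1).foldl (aBody nums _)
      (0, PySem.List.pyGetD nums 0 0)).1 = _
  have h0 : PySem.List.pyGetD nums 0 0 = pvPmax nums 1 := by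
    rw [pvPmax_one nums (by intro h; simp [h] at h2)]
    exact PySem.List.pyGetD_natCast ..
  rw [h0]
  have hm := aMain nums ((PySem.List.pyRange ((nums.length : Int) - 2) (-1) (-1)).foldl (aSufStep nums)
      (PySem.List.pySetD (List.replicate nums.length 0) ((nums.length : Int) - 1) (10 ^ 9 + 5)))
      nums.length 1 (le_refl 1) (by omega) 0
  simpa using hm

-- the value of A's suffix_min array (n ≥ 2)
theorem smA_getD (nums : List Int) (h2 : 2 ≤ nums.length) (j : Nat) (hj : j < nums.length) :
    ((PySem.List.pyRange ((nums.length : Int) - 2) (-1) (-1)).foldl (aSufStep nums)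
        (PySem.List.pySetD (List.replicate nums.length 0) ((nums.length : Int) - 1) (10 ^ 9 + 5))).getD j 0
      = pvCapA nums j := by
  have e1 : ((nums.length : Int) - 1) = (((nums.length - 1 : Nat)) : Int) := by omega
  have e2 : ((nums.length : Int) - 2) = (((nums.length - 2 : Nat)) : Int) := by omega
  rw [e1, e2, PySem.List.pySetD_natCast]
  rw [aBuild nums (nums.length - 2) _ (by simp) (by omega) ?_ j hj]
  · by_cases hjle : j ≤ nums.length - 2
    · rw [if_pos hjle]
    · rw [if_neg hjle]
      have hje : j = nums.length - 1 := by omega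
      subst hje
      rw [getD_set_self _ (by simp; omega)]
      unfold pvCapA
      rw [if_pos (by omega)]
  · intro j' h1 h2'
    have hje : j' = nums.length - 1 := by omega
    subst hje
    rw [getD_set_self _ (by simp; omega)]
    unfold pvCapA
    rw [if_pos (by omega)]

theorem getD_take (nums : List Int) (j k : Nat) (hk : k < j) (hj : j ≤ nums.length) :
    nums.getD k 0 ∈ nums.take j := by
  have hkl : k < (nums.take j).length := by simp; omega
  have : (nums.take j)[k] = nums[k] := List.getElem_take
  rw [List.getD_eq_getElem nums 0 (by omega), ← this]
  exact List.getElem_mem hkl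

theorem getD_drop (nums : List Int) (j k : Nat) (h1 : j < k) (h2 : k < nums.length) :
    nums.getD k 0 ∈ nums.drop (j + 1) := by
  have hk : k - (j + 1) < (nums.drop (j + 1)).length := by simp; omega
  rw [List.getD_eq_getElem nums 0 h2]
  refine List.mem_iff_getElem.mpr ⟨k - (j + 1), hk, ?_⟩
  rw [List.getElem_drop]
  congr 1
  omega

-- max(nums[:j]) is pvPmax j (j ≥ 1, nums nonempty)
theorem max_take (nums : List Int) (j : Nat) (h1 : 1 ≤ j) (hne : nums ≠ []) :
    PySem.List.max? (nums.take j) (fun y => y) = some (pvPmax nums j) := by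
  match nums, hne with
  | x :: t, _ =>
    match j, h1 with
    | k + 1, _ =>
      rw [List.take_succ_cons, PySem.List.max?_id_cons]
      unfold pvPmax
      rw [List.take_succ_cons]
      simp [pvX]

-- min(nums[j+1:]) is pvSmin j (j + 1 < n)
theorem min_drop (nums : List Int) (j : Nat) (hj : j + 1 < nums.length) :
    PySem.List.min? (nums.drop (j + 1)) (fun y => y) = some (pvSmin nums j) := by
  have hcons : nums.drop (j + 1) = nums[j + 1] :: nums.drop (j + 2) := by
    rw [List.drop_eq_getElem_cons hj]
  rw [hcons, PySem.List.min?_id_cons]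
  congr 1
  -- two seeded folds over the same tail compute the same minimum: antisymmetry
  have hlast : pvX nums (nums.length - 1) ∈ nums.drop (j + 1) :=
    getD_drop nums j (nums.length - 1) (by omega) (by omega)
  have hA := PySem.List.foldl_min_le (nums.drop (j + 1)) (pvX nums (nums.length - 1))
  have hB := PySem.List.foldl_min_le (nums.drop (j + 2)) (nums[j + 1])
  have hAm := PySem.List.foldl_min_mem (nums.drop (j + 1)) (pvX nums (nums.length - 1))
  have hBm := PySem.List.foldl_min_mem (nums.drop (j + 2)) (nums[j + 1])
  -- B's fold result is a member of drop (j+1)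
  have hBmem : (nums.drop (j + 2)).foldl min nums[j + 1] ∈ nums.drop (j + 1) := by
    rw [hcons]
    rcases hBm with h | h
    · rw [h]; exact List.mem_cons_self ..
    · exact List.mem_cons_of_mem _ h
  -- A's fold result is a member of drop (j+1)
  have hAmem : (nums.drop (j + 1)).foldl min (pvX nums (nums.length - 1)) ∈ nums.drop (j + 1) := by
    rcases hAm with h | h
    · rw [h]; exact hlast
    · exact h
  -- B ≤ every member of drop (j+1)
  have hBle : ∀ y ∈ nums.drop (j + 1), (nums.drop (j + 2)).foldl min nums[j + 1] ≤ y := by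
    intro y hy
    rw [hcons] at hy
    rcases List.mem_cons.mp hy with h | h
    · rw [h]; exact hB.1
    · exact hB.2 y h
  have h1 : pvSmin nums j ≤ (nums.drop (j + 2)).foldl min nums[j + 1] := hA.2 _ hBmem
  have h2 : (nums.drop (j + 2)).foldl min nums[j + 1] ≤ pvSmin nums j := hBle _ hAmem
  unfold pvSmin at *
  omega

-- B = sum of local counts + sum of global counts with the extrema's values (n ≥ 2)
theorem B_eq (nums : List Int) (h2 : 2 ≤ nums.length) :
    sumBeauties_alt nums =
      ((PySem.List.pyRange 1 ((nums.length : Int) - 1) 1).map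
        (fun i => pvLoc nums i + pvGlob nums i)).sum := by
  show ((PySem.List.pyRange 1 ((nums.length : Int) - 1) 1).map _).sum
      + ((PySem.List.pyRange 1 ((nums.length : Int) - 1) 1).map _).sum = _
  rw [PySem.List.sum_map_add_int]
  refine congrArg₂ (· + ·) rfl ?_
  refine congrArg List.sum (List.map_congr_left fun i hi => ?_)
  rw [PySem.List.mem_pyRange_one] at hi
  have ei : i = ((i.toNat : Nat) : Int) := by omega
  have hsl1 : PySem.List.slice nums none (some i) = nums.take i.toNat := by
    rw [ei, PySem.List.slice_to_natCast]; simp; omega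
  have hsl2 : PySem.List.slice nums (some (i + 1)) none = nums.drop (i.toNat + 1) := by
    have e : i + 1 = (((i.toNat + 1 : Nat)) : Int) := by omega
    rw [e, PySem.List.slice_from_natCast]
  rw [hsl1, hsl2,
    max_take nums i.toNat (by omega) (by intro h; simp [h] at h2),
    min_drop nums i.toNat (by omega)]
  simp only [Option.getD_some, pvGlob]
  rfl

-- A's per-index score with the suffix_min array replaced by its value pvCapA
def pvACap (nums : List Int) (i : Int) : Int :=
  if pvPmax nums i.toNat < PySem.List.pyGetD nums i 0 ∧
     PySem.List.pyGetD nums i 0 < pvCapA nums i.toNat then 2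
  else if PySem.List.pyGetD nums (i - 1) 0 < PySem.List.pyGetD nums i 0 ∧
          PySem.List.pyGetD nums i 0 < PySem.List.pyGetD nums (i + 1) 0 then 1
  else 0

theorem mapA (nums : List Int) (h2 : 2 ≤ nums.length) :
    (PySem.List.pyRange 1 ((nums.length : Int) - 1) 1).map
      (pvAScore nums ((PySem.List.pyRange ((nums.length : Int) - 2) (-1) (-1)).foldl (aSufStep nums)
        (PySem.List.pySetD (List.replicate nums.length 0) ((nums.length : Int) - 1) (10 ^ 9 + 5))))
    = (PySem.List.pyRange 1 ((nums.length : Int) - 1) 1).map (pvACap nums) := by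
  refine List.map_congr_left fun i hi => ?_
  rw [PySem.List.mem_pyRange_one] at hi
  have ei : i = ((i.toNat : Nat) : Int) := by omega
  simp only [pvAScore, pvACap]
  rw [ei]
  simp only [PySem.List.pyGetD_natCast, Int.toNat_natCast]
  rw [smA_getD nums h2 i.toNat (by omega)]

theorem pvX_le_pvPmax (nums : List Int) (j : Nat) (h1 : 1 ≤ j) (hj : j ≤ nums.length) :
    pvX nums (j - 1) ≤ pvPmax nums j := by
  unfold pvPmax
  exact (PySem.List.le_foldl_max (nums.take j) (pvX nums 0)).2 _ (getD_take nums j (j-1) (by omega) hj)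

theorem pvSmin_le_pvX (nums : List Int) (j : Nat) (hj : j + 1 < nums.length) :
    pvSmin nums j ≤ pvX nums (j + 1) := by
  unfold pvSmin
  exact (PySem.List.foldl_min_le (nums.drop (j + 1)) (pvX nums (nums.length - 1))).2 _
    (getD_drop nums j (j + 1) (by omega) hj)

theorem pvPmax_lt_iff (nums : List Int) (j : Nat) (h1 : 1 ≤ j) (hj : j ≤ nums.length) (c : Int) :
    pvPmax nums j < c ↔ ∀ j' < j, pvX nums j' < c := by
  constructor
  · intro h j' hj'
    have := (PySem.List.le_foldl_max (nums.take j) (pvX nums 0)).2 _ (getD_take nums j j' hj' hj)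
    unfold pvPmax at h
    exact lt_of_le_of_lt this h
  · intro h
    rcases PySem.List.foldl_max_mem (nums.take j) (pvX nums 0) with hm | hm
    · rw [pvPmax, hm]; exact h 0 (by omega)
    · rcases List.mem_iff_getElem.mp hm with ⟨k, hk, he⟩
      have hkj : k < j := by simp at hk; omega
      have : (nums.take j)[k] = nums[k]'(by simp at hk; omega) := List.getElem_take
      rw [pvPmax, he] at *
      rw [← he, this]
      calc nums[k]'(by simp at hk; omega) = pvX nums k := (List.getD_eq_getElem nums 0 _).symm
        _ < c := h k hkj

theorem lt_pvSmin_iff (nums : List Int) (j : Nat) (hj : j + 1 < nums.length) (c : Int) :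
    c < pvSmin nums j ↔ ∀ k, j < k → k < nums.length → c < pvX nums k := by
  constructor
  · intro h k h1 h2
    unfold pvSmin at h
    exact lt_of_lt_of_le h ((PySem.List.foldl_min_le (nums.drop (j + 1)) _).2 _
      (getD_drop nums j k h1 h2))
  · intro h
    rcases PySem.List.foldl_min_mem (nums.drop (j + 1)) (pvX nums (nums.length - 1)) with hm | hm
    · rw [pvSmin, hm]; exact h (nums.length - 1) (by omega) (by omega)
    · rcases List.mem_iff_getElem.mp hm with ⟨k, hk, he⟩
      have hkl : j + 1 + k < nums.length := by simp at hk; omega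
      have h2 : (nums.drop (j + 1))[k] = nums[j + 1 + k]'hkl := List.getElem_drop
      rw [pvSmin, ← he, h2]
      calc c < pvX nums (j + 1 + k) := h (j + 1 + k) (by omega) hkl
        _ = nums[j + 1 + k]'hkl := List.getD_eq_getElem nums 0 hkl

theorem point_eq (nums : List Int) (j : Nat) (hj1 : 1 ≤ j) (hj2 : j + 1 < nums.length)
    (hnd : ¬ D_sumBeauties nums) :
    pvACap nums (j : Int) = pvLoc nums (j : Int) + pvGlob nums (j : Int) := by
  have e1 : ((j : Int) - 1) = (((j - 1 : Nat)) : Int) := by omega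
  have e2 : ((j : Int) + 1) = (((j + 1 : Nat)) : Int) := by omega
  simp only [pvACap, pvLoc, pvGlob, e1, e2, PySem.List.pyGetD_natCast, Int.toNat_natCast]
  have hcap : pvCapA nums j = min (10 ^ 9 + 5) (pvSmin nums j) := if_neg (by omega)
  have ha := pvX_le_pvPmax nums j hj1 (by omega)
  have hb := pvSmin_le_pvX nums j hj2
  unfold pvX at ha hb
  by_cases hG : pvPmax nums j < nums.getD j 0 ∧ nums.getD j 0 < pvSmin nums j
  · have hINF : nums.getD j 0 < 10 ^ 9 + 5 := by
      by_contra hge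
      push_neg at hge
      refine hnd ⟨j, by omega, hj1, hj2, hge, ?_, ?_⟩
      · intro j' hj'
        exact (pvPmax_lt_iff nums j hj1 (by omega) _).mp hG.1 j' hj'
      · intro k hk hik
        exact (lt_pvSmin_iff nums j hj2 _).mp hG.2 k hik hk
    rw [hcap]
    split_ifs <;> omega
  · rcases not_and_or.mp hG with h | h <;> push_neg at h <;> rw [hcap] <;> split_ifs <;> omega

theorem A_one (nums : List Int) (h : nums.length = 1) : sumBeauties nums = 0 := by
  simp [sumBeauties, h, PySem.List.pyRange_one_eq_nil]

theorem B_one (nums : List Int) (h : nums.length = 1) : sumBeauties_alt nums = 0 := by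
  simp [sumBeauties_alt, h, PySem.List.pyRange_one_eq_nil]

theorem point_le (nums : List Int) (j : Nat) (hj1 : 1 ≤ j) (hj2 : j + 1 < nums.length) :
    pvACap nums (j : Int) ≤ pvLoc nums (j : Int) + pvGlob nums (j : Int) := by
  have e1 : ((j : Int) - 1) = (((j - 1 : Nat)) : Int) := by omega
  have e2 : ((j : Int) + 1) = (((j + 1 : Nat)) : Int) := by omega
  simp only [pvACap, pvLoc, pvGlob, e1, e2, PySem.List.pyGetD_natCast, Int.toNat_natCast]
  have hcap : pvCapA nums j = min (10 ^ 9 + 5) (pvSmin nums j) := if_neg (by omega)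
  have ha := pvX_le_pvPmax nums j hj1 (by omega)
  have hb := pvSmin_le_pvX nums j hj2
  unfold pvX at ha hb
  rw [hcap]
  split_ifs <;> omega

theorem point_strict (nums : List Int) (j : Nat) (hj1 : 1 ≤ j) (hj2 : j + 1 < nums.length)
    (hINF : 10 ^ 9 + 5 ≤ nums.getD j 0)
    (hup : ∀ j' < j, nums.getD j' 0 < nums.getD j 0)
    (hdn : ∀ k < nums.length, j < k → nums.getD j 0 < nums.getD k 0) :
    pvACap nums (j : Int) < pvLoc nums (j : Int) + pvGlob nums (j : Int) := by
  have e1 : ((j : Int) - 1) = (((j - 1 : Nat)) : Int) := by omega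
  have e2 : ((j : Int) + 1) = (((j + 1 : Nat)) : Int) := by omega
  simp only [pvACap, pvLoc, pvGlob, e1, e2, PySem.List.pyGetD_natCast, Int.toNat_natCast]
  have hcap : pvCapA nums j = min (10 ^ 9 + 5) (pvSmin nums j) := if_neg (by omega)
  have ha := pvX_le_pvPmax nums j hj1 (by omega)
  have hb := pvSmin_le_pvX nums j hj2
  unfold pvX at ha hb
  have hG1 : pvPmax nums j < nums.getD j 0 :=
    (pvPmax_lt_iff nums j hj1 (by omega) _).mpr (fun j' hj' => hup j' hj')
  have hG2 : nums.getD j 0 < pvSmin nums j :=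
    (lt_pvSmin_iff nums j hj2 _).mpr (fun k h1 h2 => hdn k h2 h1)
  rw [hcap]
  split_ifs <;> omega
-- ===== VERDICT (by name: the statement is the Claim_ definition above) =====
theorem sumBeauties_spec : Claim_unchanged_sumBeauties := by
  unfold Claim_unchanged_sumBeauties Spec_sumBeauties
  intro nums hdom hpre hnd
  by_cases h2 : 2 ≤ nums.length
  · rw [A_eq nums h2, B_eq nums h2, mapA nums h2]
    refine congrArg List.sum (List.map_congr_left fun i hi => ?_)
    rw [PySem.List.mem_pyRange_one] at hi
    have ei : i = ((i.toNat : Nat) : Int) := by omega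
    rw [ei]
    exact point_eq nums i.toNat (by omega) (by omega) hnd
  · have h1 : nums.length = 1 := by
      rcases nums with _ | ⟨a, t⟩
      · exact absurd rfl hpre
      · simp at h2 ⊢; omega
    rw [A_one nums h1, B_one nums h1]
theorem sumBeauties_changed : Claim_changed_sumBeauties := by unfold Claim_changed_sumBeauties; decide
theorem sumBeauties_tight : Claim_exact_sumBeauties := by
  unfold Claim_exact_sumBeauties
  intro nums hdom hpre hd
  obtain ⟨j, hjlen, hj1, hj2, hINF, hup, hdn⟩ := hd
  have h2 : 2 ≤ nums.length := by omega
  have hlt : sumBeauties nums < sumBeauties_alt nums := by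
    rw [A_eq nums h2, B_eq nums h2, mapA nums h2]
    refine List.sum_lt_sum _ _ ?_ ?_
    · intro i hi
      rw [PySem.List.mem_pyRange_one] at hi
      have ei : i = ((i.toNat : Nat) : Int) := by omega
      rw [ei]
      exact point_le nums i.toNat (by omega) (by omega)
    · refine ⟨(j : Int), ?_, ?_⟩
      · rw [PySem.List.mem_pyRange_one]; omega
      · exact point_strict nums j hj1 hj2 hINF hup hdn
  exact ne_of_lt hlt
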